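-- pv_equiv track=rewrite | github.com/LoLab-MSM/HypBuilder | motifBuilder.py | eliminateSubMotifs
-- ===== SOURCE A (Python) =====
-- def eliminateSubMotifs(motif_list):
--
--     # eliminate motifs that are submotifs of other motifs (A->B, B->C vs A->B, B->C, A->C)
--
--     subcheck = [False for v in motif_list]
--     for m,this in enumerate(motif_list):
--         for that in motif_list:
--             if this != that:
--                 sub = True
--                 for theOther in this:
--                     if theOther not in that:
--                         sub = False
--                 if sub:
--                     subcheck[m] = True
--     new_motif_list = []
--     for m,this in enumerate(motif_list):
--         if not subcheck[m]:
--             new_motif_list.append(this)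
--
--     return new_motif_list
-- ===== SOURCE B (Python) =====
-- def eliminateSubMotifs(motif_list):
--     # Inverted index: element -> set of indices of motifs containing it.
--     index = {}
--     for j, motif in enumerate(motif_list):
--         for e in motif:
--             index.setdefault(e, set()).add(j)
--     n = len(motif_list)
--     new_motif_list = []
--     for this in motif_list:
--         # indices of motifs containing every element of `this`
--         s = set(range(n))
--         for e in this:
--             s &= index.get(e, set())
--         if not any(motif_list[j] != this for j in s):
--             new_motif_list.append(this)
--     return new_motif_list
-- ===== Notes on version B (the rewrite author's own statement) =====
-- stated objective: faster
-- what changed: Replaces A's cubic all-pairs nested-loop subset scan by an inverted index (element -> set of motif indices containing it); each motif's set of potential supersets is the intersection of the index entries of its elements, and a motif is kept iff every motif in that intersection equals it.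
import Mathlib
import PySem

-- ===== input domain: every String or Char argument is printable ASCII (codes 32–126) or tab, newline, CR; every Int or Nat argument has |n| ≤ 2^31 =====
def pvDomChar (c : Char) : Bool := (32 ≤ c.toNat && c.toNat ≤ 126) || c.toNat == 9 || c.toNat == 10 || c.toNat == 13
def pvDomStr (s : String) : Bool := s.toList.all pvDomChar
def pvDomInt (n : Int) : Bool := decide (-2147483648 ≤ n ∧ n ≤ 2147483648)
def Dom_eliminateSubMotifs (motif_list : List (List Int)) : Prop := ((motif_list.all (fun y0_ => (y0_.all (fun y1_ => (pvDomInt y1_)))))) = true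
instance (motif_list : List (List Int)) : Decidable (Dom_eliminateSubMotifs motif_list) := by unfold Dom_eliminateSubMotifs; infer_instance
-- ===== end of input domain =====

-- B replaces A's cubic all-pairs subset scan by an inverted index (element -> set of
-- motif indices containing it) and per-motif set intersections; measurably faster.

-- ===== PORT A =====
def eliminateSubMotifs (motif_list : List (List Int)) : List (List Int) :=
  let subcheck : List Bool := motif_list.map (fun _ => false)
  let subcheck := (PySem.List.enumerate motif_list).foldl (fun sc p =>
    motif_list.foldl (fun sc that =>
      if p.2 != that then
        let sub := p.2.foldl (fun sub theOther =>
          if !(that.contains theOther) then false else sub) true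
        if sub then PySem.List.pySetD sc p.1 true else sc
      else sc) sc) subcheck
  (PySem.List.enumerate motif_list).foldl (fun acc p =>
    if !(PySem.List.pyGetD subcheck p.1 false) then acc ++ [p.2] else acc) []

-- ===== PORT B =====
-- B's inverted index: element -> set of indices of motifs containing it.
def pvIndexB (motif_list : List (List Int)) : PySem.Dict Int (PySem.Set Int) :=
  (PySem.List.enumerate motif_list).foldl (fun idx p =>
    p.2.foldl (fun idx e =>
      idx.insert e (PySem.Set.add (idx.getD e PySem.Set.empty) p.1)) idx)
    PySem.Dict.empty

def eliminateSubMotifs_alt (motif_list : List (List Int)) : List (List Int) :=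
  let index := pvIndexB motif_list
  let n : Int := (motif_list.length : Int)
  motif_list.foldl (fun acc this =>
    let s : PySem.Set Int := this.foldl (fun s e =>
      PySem.Set.inter s (index.getD e PySem.Set.empty))
      (PySem.Set.ofList (PySem.List.pyRange 0 n 1))
    if !(s.any (fun j => PySem.List.pyGetD motif_list j [] != this)) then
      acc ++ [this]
    else acc) []

-- ===== PRECONDITION & SPEC =====
def Spec_eliminateSubMotifs (motif_list : List (List Int)) (out : List (List Int)) : Prop := out = eliminateSubMotifs_alt motif_list
instance (motif_list : List (List Int)) (out : List (List Int)) : Decidable (Spec_eliminateSubMotifs motif_list out) := by unfold Spec_eliminateSubMotifs; infer_instance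

-- ===== CLAIM (what is proved, stated in full; the proofs are below) =====
def Claim_equal_eliminateSubMotifs : Prop := ∀ (motif_list : List (List Int)), Dom_eliminateSubMotifs motif_list → Spec_eliminateSubMotifs motif_list (eliminateSubMotifs motif_list)

-- ===== LEMMAS AND PROOFS =====

-- "motif t is eliminated": some other motif value contains every element of t
def elimB (xs : List (List Int)) (t : List Int) : Bool :=
  xs.any (fun that => (t != that) && t.all (fun e => that.contains e))

-- A's innermost loop computes the subset test
theorem A_inner (t that : List Int) (b : Bool) :
    t.foldl (fun sub theOther => if !(that.contains theOther) then false else sub) b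
      = (b && t.all (fun e => that.contains e)) := by
  induction t generalizing b with
  | nil => simp
  | cons a r ih =>
    simp only [List.foldl_cons, List.all_cons, ih]
    cases h : that.contains a <;> simp

-- setting the same position twice is setting it once
theorem pySetD_idem (sc : List Bool) (m : Int) (v : Bool) (hm : 0 ≤ m) :
    PySem.List.pySetD (PySem.List.pySetD sc m v) m v = PySem.List.pySetD sc m v := by
  rw [PySem.List.pySetD_of_nonneg _ _ hm, PySem.List.pySetD_of_nonneg _ _ hm, List.set_set]

-- a loop that conditionally marks one fixed position
theorem foldl_mark {α : Type} (q : α → Bool) (m : Int) (hm : 0 ≤ m) (ys : List α) (sc : List Bool) :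
    ys.foldl (fun sc that => if q that then PySem.List.pySetD sc m true else sc) sc
    = if ys.any q then PySem.List.pySetD sc m true else sc := by
  induction ys generalizing sc with
  | nil => simp
  | cons y r ih =>
    simp only [List.foldl_cons, ih, List.any_cons]
    by_cases hq : q y = true
    · by_cases hr : (r.any q) = true <;> simp [hq, hr, pySetD_idem sc m true hm]
    · simp [hq]

-- A's middle-loop body, with the inner subset loop evaluated
theorem A_body_eq (t : List Int) (m : Int) :
    (fun (sc : List Bool) (that : List Int) =>
       if t != that then
         (if t.foldl (fun sub theOther => if !(that.contains theOther) then false else sub) true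
          then PySem.List.pySetD sc m true else sc)
       else sc)
    = (fun sc that =>
        if (t != that) && t.all (fun e => that.contains e) then PySem.List.pySetD sc m true else sc) := by
  funext sc that
  rw [A_inner, Bool.true_and]
  by_cases h : (t != that) = true <;> by_cases h2 : (t.all fun e => that.contains e) = true <;>
    simp [h]

-- A's outer marking loop produces the map of elimB over the list
theorem A_setloop (c : List Int → Bool) (xs : List (List Int)) (pre : List Bool) :
    (PySem.List.enumerate xs (pre.length : Int)).foldl
      (fun sc p => if c p.2 then PySem.List.pySetD sc p.1 true else sc)
      (pre ++ xs.map (fun _ => false))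
    = pre ++ xs.map c := by
  induction xs generalizing pre with
  | nil => simp
  | cons x r ih =>
    rw [PySem.List.enumerate_cons]
    simp only [List.foldl_cons, List.map_cons]
    have hset : (if c x then PySem.List.pySetD (pre ++ false :: r.map (fun _ => false)) (pre.length : Int) true
                 else (pre ++ false :: r.map (fun _ => false)))
        = (pre ++ [c x]) ++ r.map (fun _ => false) := by
      cases h : c x <;>
        simp [PySem.List.pySetD_of_nonneg _ _ (Int.natCast_nonneg pre.length)]
    rw [hset]
    have hlen : ((pre.length : Int) + 1) = (((pre ++ [c x]).length : Nat) : Int) := by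
      simp
    rw [hlen, ih (pre ++ [c x])]
    simp

-- A's final loop filters by the computed flags
theorem A_outloop (L : List Bool) (c : List Int → Bool)
    (rest : List (List Int)) (s : Nat) (acc : List (List Int))
    (h : ∀ k, (hk : k < rest.length) → PySem.List.pyGetD L ((s + k : Nat) : Int) false = c rest[k]) :
    (PySem.List.enumerate rest (s : Int)).foldl
      (fun acc p => if !(PySem.List.pyGetD L p.1 false) then acc ++ [p.2] else acc) acc
    = acc ++ rest.filter (fun t => !(c t)) := by
  induction rest generalizing s acc with
  | nil => simp
  | cons x r ih =>
    rw [PySem.List.enumerate_cons]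
    simp only [List.foldl_cons]
    have h0 : PySem.List.pyGetD L (s : Int) false = c x := by
      have := h 0 (by simp)
      simpa using this
    have hs : ((s : Int) + 1) = (((s + 1 : Nat)) : Int) := by push_cast; ring
    have hr : ∀ k, (hk : k < r.length) →
        PySem.List.pyGetD L (((s + 1) + k : Nat) : Int) false = c r[k] := by
      intro k hk
      have := h (k + 1) (by simpa using Nat.succ_lt_succ hk)
      simpa [Nat.add_assoc, Nat.add_comm 1 k] using this
    rw [h0, hs]
    cases hc : c x <;> simp only [Bool.not_false, Bool.not_true, if_true] <;>
      rw [ih (s + 1) _ hr] <;> simp [hc]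

-- the flag list A computes, pointwise
theorem A_flags (xs : List (List Int)) :
    (PySem.List.enumerate xs).foldl (fun sc p =>
      xs.foldl (fun sc that =>
        if p.2 != that then
          (if p.2.foldl (fun sub theOther =>
              if !(that.contains theOther) then false else sub) true
           then PySem.List.pySetD sc p.1 true else sc)
        else sc) sc) (xs.map (fun _ => false))
    = xs.map (elimB xs) := by
  have hbody : ∀ p ∈ PySem.List.enumerate xs, ∀ (sc : List Bool),
      xs.foldl (fun sc that =>
        if p.2 != that then
          (if p.2.foldl (fun sub theOther =>
              if !(that.contains theOther) then false else sub) true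
           then PySem.List.pySetD sc p.1 true else sc)
        else sc) sc
      = (fun sc (p : Int × List Int) =>
          if elimB xs p.2 then PySem.List.pySetD sc p.1 true else sc) sc p := by
    intro p hp sc
    obtain ⟨k, hk, rfl⟩ := (PySem.List.mem_enumerate_iff xs 0 p).1 hp
    have hm : (0 : Int) ≤ 0 + (k : Int) := by positivity
    rw [A_body_eq, foldl_mark _ _ hm]
    rfl
  rw [PySem.List.foldl_congr_mem' _ _ _ _ hbody]
  have h := A_setloop (elimB xs) xs []
  simpa using h

theorem A_eq (xs : List (List Int)) :
    eliminateSubMotifs xs = xs.filter (fun t => !(elimB xs t)) := by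
  simp only [eliminateSubMotifs]
  rw [A_flags]
  have hlook : ∀ k, (hk : k < xs.length) →
      PySem.List.pyGetD (xs.map (elimB xs)) ((0 + k : Nat) : Int) false = elimB xs xs[k] := by
    intro k hk
    rw [PySem.List.pyGetD_natCast]
    simp [List.getD_eq_getElem?_getD, List.getElem?_map, List.getElem?_eq_getElem hk]
  have h := A_outloop (xs.map (elimB xs)) (elimB xs) xs 0 [] hlook
  simpa using h

-- B: membership in the index after inserting one motif's elements
theorem B_inner_mem (motif : List Int) (m j e : Int) (idx : PySem.Dict Int (PySem.Set Int)) :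
    (j ∈ (motif.foldl (fun idx e =>
        idx.insert e (PySem.Set.add (idx.getD e PySem.Set.empty) m)) idx).getD e PySem.Set.empty)
    ↔ (j ∈ idx.getD e PySem.Set.empty ∨ (e ∈ motif ∧ j = m)) := by
  induction motif generalizing idx with
  | nil => simp
  | cons a r ih =>
    simp only [List.foldl_cons, ih, List.mem_cons]
    rw [PySem.Dict.getD_insert]
    by_cases h : e = a
    · subst h
      simp only [if_true, PySem.Set.mem_add]
      tauto
    · simp only [if_neg h]
      tauto

theorem B_index_mem_aux (e j : Int) (rest : List (List Int)) (s : Int)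
    (idx : PySem.Dict Int (PySem.Set Int)) :
    (j ∈ ((PySem.List.enumerate rest s).foldl (fun idx p =>
        p.2.foldl (fun idx e =>
          idx.insert e (PySem.Set.add (idx.getD e PySem.Set.empty) p.1)) idx) idx).getD
        e PySem.Set.empty)
    ↔ (j ∈ idx.getD e PySem.Set.empty
        ∨ ∃ k, ∃ (hk : k < rest.length), e ∈ rest[k] ∧ j = s + (k : Int)) := by
  induction rest generalizing s idx with
  | nil => simp
  | cons x r ih =>
    rw [PySem.List.enumerate_cons]
    simp only [List.foldl_cons]
    rw [ih, B_inner_mem]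
    constructor
    · rintro ((h | ⟨he, rfl⟩) | ⟨k, hk, he, rfl⟩)
      · exact Or.inl h
      · exact Or.inr ⟨0, by simp, by simpa using he, by simp⟩
      · refine Or.inr ⟨k + 1, by simpa using Nat.succ_lt_succ hk, by simpa using he, by push_cast; ring⟩
    · rintro (h | ⟨k, hk, he, rfl⟩)
      · exact Or.inl (Or.inl h)
      · cases k with
        | zero => exact Or.inl (Or.inr ⟨by simpa using he, by simp⟩)
        | succ k =>
          refine Or.inr ⟨k, by simpa using Nat.lt_of_succ_lt_succ hk, by simpa using he, by push_cast; ring⟩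

-- B: membership in the finished inverted index
theorem B_index_mem (xs : List (List Int)) (e j : Int) :
    j ∈ (pvIndexB xs).getD e PySem.Set.empty
    ↔ ∃ k, ∃ (hk : k < xs.length), e ∈ xs[k] ∧ j = (k : Int) := by
  rw [pvIndexB, B_index_mem_aux]
  simp [PySem.Dict.getD, PySem.Dict.get?_empty, PySem.Set.empty]

-- B: the intersection loop filters the initial set
theorem B_interfold (t : List Int) (f : Int → PySem.Set Int) (s0 : PySem.Set Int) :
    t.foldl (fun s e => PySem.Set.inter s (f e)) s0
    = s0.filter (fun j => t.all (fun e => (f e).contains j)) := by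
  induction t generalizing s0 with
  | nil => simp
  | cons a r ih =>
    rw [List.foldl_cons, ih]
    simp only [PySem.Set.inter, List.filter_filter, List.all_cons]
    congr 1
    funext x
    exact Bool.and_comm _ _

-- B: the any-test over the intersected set is elimB
theorem B_any (xs : List (List Int)) (t : List Int) :
    ((PySem.Set.ofList (PySem.List.pyRange 0 (xs.length : Int) 1)).filter
        (fun j => t.all (fun e => ((pvIndexB xs).getD e PySem.Set.empty).contains j))).any
      (fun j => PySem.List.pyGetD xs j [] != t)
    = elimB xs t := by
  rw [Bool.eq_iff_iff]
  simp only [List.any_eq_true, List.mem_filter, PySem.Set.mem_ofList,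
    PySem.List.mem_pyRange_one, List.all_eq_true, PySem.Set.contains,
    List.contains_iff_mem, bne_iff_ne, elimB, B_index_mem, Bool.and_eq_true]
  constructor
  · rintro ⟨j, ⟨⟨hj0, hjn⟩, hall⟩, hne⟩
    have hjlt : j.toNat < xs.length := by omega
    refine ⟨xs[j.toNat], List.getElem_mem hjlt, ?_, ?_⟩
    · intro heq
      apply hne
      rw [PySem.List.pyGetD_eq_getElem xs [] hj0 hjn, heq]
    · intro e he
      obtain ⟨k, hk, hek, hjk⟩ := hall e he
      have : k = j.toNat := by omega
      subst this
      exact hek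
  · rintro ⟨that, hmem, hne, hall⟩
    obtain ⟨k, hk, rfl⟩ := List.mem_iff_getElem.1 hmem
    refine ⟨(k : Int), ⟨⟨by positivity, by exact_mod_cast hk⟩, ?_⟩, ?_⟩
    · intro e he
      exact ⟨k, hk, hall e he, rfl⟩
    · rw [PySem.List.pyGetD_eq_getElem xs [] (by positivity) (by exact_mod_cast hk)]
      simp only [Int.toNat_natCast]
      exact fun h => hne h.symm

theorem B_eq (xs : List (List Int)) :
    eliminateSubMotifs_alt xs = xs.filter (fun t => !(elimB xs t)) := by
  simp only [eliminateSubMotifs_alt]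
  have hbody : ∀ t ∈ xs, ∀ (acc : List (List Int)),
      (let s : PySem.Set Int := t.foldl (fun s e =>
          PySem.Set.inter s ((pvIndexB xs).getD e PySem.Set.empty))
          (PySem.Set.ofList (PySem.List.pyRange 0 (xs.length : Int) 1))
       if !(s.any (fun j => PySem.List.pyGetD xs j [] != t)) then acc ++ [t] else acc)
      = (fun acc t => if (!(elimB xs t)) = true then acc ++ [t] else acc) acc t := by
    intro t _ acc
    simp only [B_interfold, B_any]
  rw [PySem.List.foldl_congr_mem' _ _ _ _ hbody,
      PySem.List.foldl_append_if_eq_filter]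
  simp

-- ===== VERDICT (by name: the statement is the Claim_ definition above) =====
theorem eliminateSubMotifs_spec : Claim_equal_eliminateSubMotifs := by
  intro xs _
  unfold Spec_eliminateSubMotifs
  rw [A_eq, B_eq]
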